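-- pv_equiv track=rewrite | github.com/chiranjeevg/vigil | vigil/core/task_planner.py | _rotate_priorities_from_history
-- ===== SOURCE A (Python) =====
-- def _rotate_priorities_from_history(
--     priorities: list[str],
--     recent_iterations: list[dict],
-- ) -> list[str]:
--     """Rotate all recently attempted task types to the end of the walk.
--
--     Processes the last ``len(priorities)`` iterations in chronological order.
--     Each iteration's ``task_type`` is moved to the end so the planner advances
--     through the full priority list.
--
--     Example with config ``[A, B, C]`` and history ``[A-success, B-success]``:
--       start   → [A, B, C]
--       after A → [B, C, A]
--       after B → [C, A, B]
--       next pick: C  ✓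
--
--     Without this, the planner only rotates the *single* last task type and
--     permanently ping-pongs between positions 1 and 2.
--     """
--     out = list(priorities)
--     if not recent_iterations:
--         return out
--
--     for it in recent_iterations:
--         task_type = it.get("task_type")
--         if task_type and isinstance(task_type, str) and task_type in out:
--             out.remove(task_type)
--             out.append(task_type)
--
--     return out
-- ===== SOURCE B (Python) =====
-- def _rotate_priorities_from_history(
--     priorities: list[str],
--     recent_iterations: list[dict],
-- ) -> list[str]:
--     out = list(priorities)
--     if not recent_iterations:
--         return out
--     pset = set(priorities)
--     seen = set()
--     moved_rev = []  # moved task types, by LAST occurrence, newest first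
--     for it in reversed(recent_iterations):
--         t = it.get("task_type")
--         if t and isinstance(t, str) and t in pset and t not in seen:
--             seen.add(t)
--             moved_rev.append(t)
--     return [p for p in priorities if p not in seen] + moved_rev[::-1]
-- ===== Notes on version B (the rewrite author's own statement) =====
-- stated objective: alternative
-- what changed: Instead of repeatedly removing/appending inside the priority list per history entry, B makes one reverse pass over the history collecting each moved task type at its last occurrence and then rebuilds the list once (unmoved priorities in order, then moved ones in last-occurrence order); Pre_ excludes inputs where a duplicated priority entry occurs as a nonempty task_type in the history, on which A's rotation of one copy of the duplicate is accidental and B collapses the duplicate.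
-- outside the precondition, e.g. on _rotate_priorities_from_history(['a', 'a'], [{'task_type': 'a'}]): A returns ['a', 'a'], B returns ['a']
import Mathlib
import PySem

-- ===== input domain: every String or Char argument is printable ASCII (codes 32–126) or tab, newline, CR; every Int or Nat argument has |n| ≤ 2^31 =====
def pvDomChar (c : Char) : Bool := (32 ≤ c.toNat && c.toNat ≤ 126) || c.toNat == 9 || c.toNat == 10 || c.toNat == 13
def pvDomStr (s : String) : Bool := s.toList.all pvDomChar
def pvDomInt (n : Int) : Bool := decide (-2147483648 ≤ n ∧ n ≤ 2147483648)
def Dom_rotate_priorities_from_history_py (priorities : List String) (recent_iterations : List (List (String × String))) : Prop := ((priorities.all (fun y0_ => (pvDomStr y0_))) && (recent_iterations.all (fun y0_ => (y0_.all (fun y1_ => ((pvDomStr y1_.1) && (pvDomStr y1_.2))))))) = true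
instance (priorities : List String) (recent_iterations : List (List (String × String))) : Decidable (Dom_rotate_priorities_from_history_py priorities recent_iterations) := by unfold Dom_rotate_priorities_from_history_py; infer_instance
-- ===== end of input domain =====

-- B replaces A's per-iteration remove/append shuffling of the priority list by one reverse pass
-- over the history (last occurrence of each moved task type) plus a single rebuild (alternative algorithm).
-- ===== PORT A =====
def rotate_priorities_from_history_py (priorities : List String) (recent_iterations : List (List (String × String))) : List String :=
  let out := priorities
  if recent_iterations = [] then out else
  recent_iterations.foldl (fun out it =>
    match (PySem.Dict.mk it).get? "task_type" with
    | some task_type =>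
      if task_type ≠ "" ∧ out.contains task_type then
        match PySem.List.remove? out task_type with
        | some out' => out' ++ [task_type]
        | none => out
      else out
    | none => out) out

-- ===== PORT B =====
def rotate_priorities_from_history_py_alt (priorities : List String) (recent_iterations : List (List (String × String))) : List String :=
  let out := priorities
  if recent_iterations = [] then out else
  let pset : PySem.Set String := PySem.Set.ofList priorities
  let res := recent_iterations.reverse.foldl
    (fun (st : PySem.Set String × List String) it =>
      match (PySem.Dict.mk it).get? "task_type" with
      | some t =>
        if t ≠ "" ∧ pset.contains t ∧ ¬ st.1.contains t then (PySem.Set.add st.1 t, st.2 ++ [t])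
        else st
      | none => st) (PySem.Set.empty, [])
  -- moved_rev[::-1] is List.reverse
  priorities.filter (fun p => !(res.1.contains p)) ++ res.2.reverse

-- ===== PRECONDITION & SPEC =====
-- Pre_ excludes inputs where a DUPLICATED priority entry occurs as a nonempty task_type in the
-- history: there A rotates just one copy of the duplicate while B collapses the duplicate
-- (a duplicate-key-like corner with no intended behaviour).
def Pre_rotate_priorities_from_history_py (priorities : List String) (recent_iterations : List (List (String × String))) : Prop :=
  ∀ t ∈ priorities, t ≠ "" → 1 < priorities.count t →
    ∀ it ∈ recent_iterations, (PySem.Dict.mk it).get? "task_type" ≠ some t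
instance (priorities : List String) (recent_iterations : List (List (String × String))) : Decidable (Pre_rotate_priorities_from_history_py priorities recent_iterations) := by unfold Pre_rotate_priorities_from_history_py; infer_instance
def pvWitness_rotate_priorities_from_history_py : List String × (List (List (String × String))) := (["a", "b", "c"], [[("task_type", "a")]])
def Spec_rotate_priorities_from_history_py (priorities : List String) (recent_iterations : List (List (String × String))) (out : List String) : Prop := out = rotate_priorities_from_history_py_alt priorities recent_iterations
instance (priorities : List String) (recent_iterations : List (List (String × String))) (out : List String) : Decidable (Spec_rotate_priorities_from_history_py priorities recent_iterations out) := by unfold Spec_rotate_priorities_from_history_py; infer_instance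

-- ===== CLAIM (what is proved, stated in full; the proofs are below) =====
def Claim_equal_rotate_priorities_from_history_py : Prop := ∀ (priorities : List String) (recent_iterations : List (List (String × String))), Dom_rotate_priorities_from_history_py priorities recent_iterations → Pre_rotate_priorities_from_history_py priorities recent_iterations → Spec_rotate_priorities_from_history_py priorities recent_iterations (rotate_priorities_from_history_py priorities recent_iterations)

-- ===== LEMMAS AND PROOFS =====

lemma pv_foldl_add (xs : List String) : ∀ (s : List String),
    xs.foldl PySem.Set.add s = s ++ (PySem.Set.ofList xs).filter (fun x => !(s.contains x)) := by
  induction xs with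
  | nil => intro s; simp [PySem.Set.ofList]
  | cons x xs ih =>
    intro s
    have hof : PySem.Set.ofList (x :: xs) = x :: (PySem.Set.ofList xs).filter (fun y => !(y == x)) := by
      rw [PySem.Set.ofList_eq_foldl, List.foldl_cons]
      have h1 : PySem.Set.add ([] : List String) x = [x] := by simp [PySem.Set.add]
      rw [h1, ih [x]]
      simp only [List.singleton_append, List.cons.injEq, true_and]
      apply List.filter_congr
      intro y _
      simp only [List.contains_eq_mem, List.mem_cons, List.not_mem_nil, or_false,
        Bool.not_eq_eq_eq_not, Bool.not_not]
      exact Eq.symm (Bool.beq_eq_decide_eq y x)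
    rw [List.foldl_cons, ih (PySem.Set.add s x), hof]
    by_cases hx : x ∈ s
    · have ha : PySem.Set.add s x = s := by simp [PySem.Set.add, hx]
      have hc : (!s.contains x) = false := by simp [hx]
      rw [ha]
      congr 1
      rw [List.filter_cons, hc]
      simp only [Bool.false_eq_true, if_false]
      rw [List.filter_filter]
      apply List.filter_congr
      intro y _
      by_cases hyx : y = x <;> simp [hyx, hx]
    · have ha : PySem.Set.add s x = s ++ [x] := by simp [PySem.Set.add, hx]
      have hc : (!s.contains x) = true := by simp [hx]
      rw [ha]
      rw [List.filter_cons, hc]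
      simp only [if_true]
      rw [List.filter_filter, List.append_assoc, List.singleton_append]
      congr 2
      apply List.filter_congr
      intro y _
      by_cases hyx : y = x <;> simp [hyx, hx]

def pvMove (m : List String) (t : String) : List String := m.erase t ++ [t]

lemma pv_ofList_cons (x : String) (xs : List String) :
    PySem.Set.ofList (x :: xs) = x :: (PySem.Set.ofList xs).filter (fun y => !(y == x)) := by
  rw [PySem.Set.ofList_eq_foldl, List.foldl_cons]
  have h1 : PySem.Set.add ([] : List String) x = [x] := by simp [PySem.Set.add]
  rw [h1, pv_foldl_add xs [x]]
  simp only [List.singleton_append, List.cons.injEq, true_and]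
  apply List.filter_congr
  intro y _
  simp only [List.contains_eq_mem, List.mem_cons, List.not_mem_nil, or_false,
    Bool.not_eq_eq_eq_not, Bool.not_not]
  exact Eq.symm (Bool.beq_eq_decide_eq y x)

lemma pv_foldl_move (l : List String) :
    l.foldl pvMove [] = (PySem.Set.ofList l.reverse).reverse := by
  induction l using List.reverseRecOn with
  | nil => simp [PySem.Set.ofList]
  | append_singleton l t ih =>
    rw [List.foldl_append, List.foldl_cons, List.foldl_nil, ih]
    rw [List.reverse_append, List.reverse_singleton, List.singleton_append, pv_ofList_cons]
    rw [List.reverse_cons, ← List.filter_reverse]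
    unfold pvMove
    congr 1
    have hnd : (PySem.Set.ofList l.reverse).reverse.Nodup :=
      List.nodup_reverse.mpr (PySem.Set.nodup_ofList l.reverse)
    rw [List.Nodup.erase_eq_filter hnd t]
    rfl

def pvTok (pr : List String) (it : List (String × String)) : List String :=
  match (PySem.Dict.mk it).get? "task_type" with
  | some t => if t ≠ "" ∧ t ∈ pr then [t] else []
  | none => []

def pvStepB (pr : List String) (st : PySem.Set String × List String) (it : List (String × String)) : PySem.Set String × List String :=
  match (PySem.Dict.mk it).get? "task_type" with
  | some t =>
    if t ≠ "" ∧ (PySem.Set.ofList pr).contains t ∧ ¬ st.1.contains t then (PySem.Set.add st.1 t, st.2 ++ [t])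
    else st
  | none => st

lemma pv_stepB_one (pr : List String) (it : List (String × String)) (s : List String) :
    pvStepB pr (s, s) it = ((pvTok pr it).foldl PySem.Set.add s, (pvTok pr it).foldl PySem.Set.add s) := by
  unfold pvStepB pvTok
  cases h : (PySem.Dict.mk it).get? "task_type" with
  | none => simp
  | some t =>
    simp only
    by_cases h2 : t ≠ "" ∧ t ∈ pr
    · rw [if_pos h2]
      simp only [List.foldl_cons, List.foldl_nil]
      by_cases hs : (s.contains t : Bool)
      · rw [if_neg (by intro hc; exact hc.2.2 hs)]
        have : PySem.Set.add s t = s := by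
          simp only [PySem.Set.add, PySem.Set.contains]
          rw [if_pos hs]
        rw [this]
      · rw [if_pos ⟨h2.1, by simpa [PySem.Set.mem_ofList] using h2.2, by simpa using hs⟩]
        have : PySem.Set.add s t = s ++ [t] := by
          simp only [PySem.Set.add, PySem.Set.contains]
          rw [if_neg hs]
        rw [this]
    · rw [if_neg (by
        intro hc
        exact h2 ⟨hc.1, by simpa [PySem.Set.mem_ofList] using hc.2.1⟩)]
      rw [if_neg h2]
      simp

lemma pv_foldl_stepB (pr : List String) (its : List (List (String × String))) : ∀ (s : List String),
    its.foldl (pvStepB pr) (s, s) =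
      ((its.flatMap (pvTok pr)).foldl PySem.Set.add s, (its.flatMap (pvTok pr)).foldl PySem.Set.add s) := by
  induction its with
  | nil => intro s; simp
  | cons it its ih =>
    intro s
    rw [List.foldl_cons, List.flatMap_cons, List.foldl_append, pv_stepB_one, ih]

lemma pv_erase_eq_filter_count (l : List String) (t : String) (h : l.count t ≤ 1) :
    l.erase t = l.filter (fun x => !(x == t)) := by
  induction l with
  | nil => rfl
  | cons x l ih =>
    by_cases hxt : x = t
    · subst hxt
      rw [List.erase_cons_head, List.filter_cons]
      have h0 : l.count x = 0 := by
        have h1 : List.count x (x :: l) = List.count x l + 1 := List.count_cons_self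
        omega
      simp only [beq_self_eq_true, Bool.not_true, Bool.false_eq_true, if_false]
      rw [List.filter_eq_self.mpr]
      intro a ha
      have hax : a ≠ x := fun he => List.count_eq_zero.mp h0 (he ▸ ha)
      simpa using hax
    · rw [List.erase_cons_tail (by simpa using hxt), List.filter_cons]
      have hb : (!(x == t)) = true := by simpa using hxt
      rw [hb, if_pos rfl]
      congr 1
      apply ih
      have h1 : (x :: l).count t = l.count t := by simp [hxt]
      omega

lemma pvTok_mem (pr : List String) (it : List (String × String)) (t : String) (ht : t ∈ pvTok pr it) :
    (PySem.Dict.mk it).get? "task_type" = some t ∧ t ≠ "" ∧ t ∈ pr := by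
  unfold pvTok at ht
  cases h : (PySem.Dict.mk it).get? "task_type" with
  | none => rw [h] at ht; simp at ht
  | some t' =>
    rw [h] at ht
    dsimp only at ht
    by_cases hc : t' ≠ "" ∧ t' ∈ pr
    · rw [if_pos hc] at ht
      have heq : t = t' := by simpa using ht
      subst heq
      exact ⟨rfl, hc.1, hc.2⟩
    · rw [if_neg hc] at ht
      simp at ht

def pvStepA (out : List String) (it : List (String × String)) : List String :=
  match (PySem.Dict.mk it).get? "task_type" with
  | some task_type =>
    if task_type ≠ "" ∧ out.contains task_type then
      match PySem.List.remove? out task_type with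
      | some out' => out' ++ [task_type]
      | none => out
    else out
  | none => out

lemma pv_stepA_one (pr : List String) (it : List (String × String))
    (htok : ∀ t ∈ pvTok pr it, pr.count t ≤ 1)
    (m : List String) (hm : m.Nodup) (hsub : ∀ x ∈ m, x ∈ pr) :
    pvStepA (pr.filter (fun p => !(m.contains p)) ++ m) it =
      pr.filter (fun p => !(((pvTok pr it).foldl pvMove m).contains p)) ++ (pvTok pr it).foldl pvMove m := by
  have hmem : ∀ x, x ∈ pr.filter (fun p => !(m.contains p)) ++ m ↔ x ∈ pr := by
    intro x
    simp only [List.mem_append, List.mem_filter, List.contains_eq_mem, Bool.not_eq_eq_eq_not,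
      Bool.not_true, decide_eq_false_iff_not]
    constructor
    · rintro (⟨h1, _⟩ | h1)
      · exact h1
      · exact hsub x h1
    · intro hx
      by_cases hxm : x ∈ m
      · exact Or.inr hxm
      · exact Or.inl ⟨hx, hxm⟩
  unfold pvStepA pvTok
  cases h : (PySem.Dict.mk it).get? "task_type" with
  | none => simp
  | some t =>
    simp only
    by_cases h2 : t ≠ "" ∧ t ∈ pr
    · have hin : t ∈ pr.filter (fun p => !(m.contains p)) ++ m := (hmem t).mpr h2.2
      rw [if_pos ⟨h2.1, by simpa using hin⟩, if_pos h2,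
        PySem.List.remove?_eq_some_erase _ t hin]
      simp only [List.foldl_cons, List.foldl_nil]
      unfold pvMove
      rw [← List.append_assoc]
      congr 1
      by_cases htm : t ∈ m
      · have hnf : t ∉ pr.filter (fun p => !(m.contains p)) := by
          simp [List.mem_filter, htm]
        rw [List.erase_append_right _ hnf]
        congr 1
        apply List.filter_congr
        intro x _
        simp only [List.contains_eq_mem, List.mem_append, List.mem_cons, List.not_mem_nil, or_false]
        by_cases hxt : x = t
        · subst hxt; simp [htm, List.Nodup.mem_erase_iff hm]
        · simp [List.Nodup.mem_erase_iff hm, hxt]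
      · have hf : t ∈ pr.filter (fun p => !(m.contains p)) := by
          simp [List.mem_filter, htm, h2.2]
        rw [List.erase_append_left _ hf, List.erase_of_not_mem htm]
        congr 1
        have hc1 : (pr.filter (fun p => !(m.contains p))).count t ≤ 1 :=
          le_trans (List.Sublist.count_le t List.filter_sublist)
            (htok t (by unfold pvTok; rw [h]; simp [h2]))
        rw [pv_erase_eq_filter_count _ t hc1, List.filter_filter]
        apply List.filter_congr
        intro x _
        simp only [List.contains_eq_mem, List.mem_append, List.mem_cons, List.not_mem_nil, or_false]
        by_cases hxt : x = t <;> simp [hxt]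
    · rw [if_neg h2]
      simp only [List.foldl_nil]
      by_cases ht : t = ""
      · rw [if_neg (by intro hc; exact hc.1 ht)]
      · have : t ∉ pr := fun hp => h2 ⟨ht, hp⟩
        rw [if_neg (by
          intro hc
          exact this ((hmem t).mp (by simpa using hc.2)))]

lemma pvTok_cases (pr : List String) (it : List (String × String)) :
    pvTok pr it = [] ∨ ∃ t, pvTok pr it = [t] ∧ t ∈ pr := by
  unfold pvTok
  cases (PySem.Dict.mk it).get? "task_type" with
  | none => exact Or.inl rfl
  | some t =>
    by_cases h2 : t ≠ "" ∧ t ∈ pr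
    · exact Or.inr ⟨t, by simp [h2], h2.2⟩
    · exact Or.inl (by simp [h2])

lemma pvMove_nodup (m : List String) (t : String) (hm : m.Nodup) : (pvMove m t).Nodup := by
  unfold pvMove
  refine List.Nodup.append (hm.erase t) (List.nodup_singleton t) ?_
  intro x hx
  simp only [List.mem_singleton]
  intro he
  subst he
  exact (List.Nodup.mem_erase_iff hm |>.mp hx).1 rfl

lemma pv_foldl_stepA (pr : List String) (its : List (List (String × String))) :
    ∀ (m : List String), (∀ it ∈ its, ∀ t ∈ pvTok pr it, pr.count t ≤ 1) →
    m.Nodup → (∀ x ∈ m, x ∈ pr) →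
    its.foldl pvStepA (pr.filter (fun p => !(m.contains p)) ++ m) =
      pr.filter (fun p => !(((its.flatMap (pvTok pr)).foldl pvMove m).contains p)) ++
        (its.flatMap (pvTok pr)).foldl pvMove m := by
  induction its with
  | nil => intro m _ _ _; simp
  | cons it its ih =>
    intro m htoks hm hsub
    rw [List.foldl_cons,
      pv_stepA_one pr it (htoks it (List.mem_cons_self)) m hm hsub,
      List.flatMap_cons, List.foldl_append]
    have hcase := pvTok_cases pr it
    have hm' : ((pvTok pr it).foldl pvMove m).Nodup := by
      rcases hcase with hpt | ⟨t, hpt, _⟩ <;> rw [hpt]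
      · simpa using hm
      · simpa using pvMove_nodup m t hm
    have hsub' : ∀ x ∈ (pvTok pr it).foldl pvMove m, x ∈ pr := by
      rcases hcase with hpt | ⟨t, hpt, htpr⟩ <;> rw [hpt]
      · simpa using hsub
      · simp only [List.foldl_cons, List.foldl_nil]
        intro x hx
        unfold pvMove at hx
        rcases List.mem_append.mp hx with hx | hx
        · exact hsub x (List.mem_of_mem_erase hx)
        · have : x = t := by simpa using hx
          subst this; exact htpr
    exact ih _ (fun it' hit' => htoks it' (List.mem_cons_of_mem _ hit')) hm' hsub'

lemma pvTok_reverse (pr : List String) (it : List (String × String)) : (pvTok pr it).reverse = pvTok pr it := by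
  rcases pvTok_cases pr it with h | ⟨t, h, _⟩ <;> rw [h] <;> rfl

lemma pv_main (pr : List String) (its : List (List (String × String)))
    (hpre : Pre_rotate_priorities_from_history_py pr its) :
    rotate_priorities_from_history_py pr its = rotate_priorities_from_history_py_alt pr its := by
  unfold rotate_priorities_from_history_py rotate_priorities_from_history_py_alt
  by_cases h0 : its = []
  · simp [h0]
  · simp only [h0, if_false]
    show its.foldl pvStepA pr =
      pr.filter (fun p => !((its.reverse.foldl (pvStepB pr) (PySem.Set.empty, [])).1.contains p)) ++
        (its.reverse.foldl (pvStepB pr) (PySem.Set.empty, [])).2.reverse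
    have hstart : pr = pr.filter (fun p => !(([] : List String).contains p)) ++ [] := by simp
    rw [show its.foldl pvStepA pr = its.foldl pvStepA (pr.filter (fun p => !(([] : List String).contains p)) ++ []) by rw [← hstart]]
    have htoks : ∀ it ∈ its, ∀ t ∈ pvTok pr it, pr.count t ≤ 1 := by
      intro it hit t ht
      obtain ⟨hg, hne, hmem⟩ := pvTok_mem pr it t ht
      by_contra hgt
      exact hpre t hmem hne (by omega) it hit hg
    rw [pv_foldl_stepA pr its [] htoks List.nodup_nil (by simp)]
    have hB : its.reverse.foldl (pvStepB pr) (PySem.Set.empty, []) =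
        ((its.reverse.flatMap (pvTok pr)).foldl PySem.Set.add [],
         (its.reverse.flatMap (pvTok pr)).foldl PySem.Set.add []) := pv_foldl_stepB pr its.reverse []
    rw [hB]
    have hrev : its.reverse.flatMap (pvTok pr) = (its.flatMap (pvTok pr)).reverse := by
      rw [List.flatMap_reverse, show (List.reverse ∘ pvTok pr) = pvTok pr from funext (pvTok_reverse pr)]
    have hX : (its.reverse.flatMap (pvTok pr)).foldl PySem.Set.add [] =
        PySem.Set.ofList ((its.flatMap (pvTok pr)).reverse) := by
      rw [hrev, PySem.Set.ofList_eq_foldl]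
    rw [hX]
    have hM : (its.flatMap (pvTok pr)).foldl pvMove [] =
        (PySem.Set.ofList ((its.flatMap (pvTok pr)).reverse)).reverse := pv_foldl_move _
    rw [hM]
    dsimp only
    congr 1
    apply List.filter_congr
    intro x _
    simp [List.contains_eq_mem]

-- ===== VERDICT (by name: the statement is the Claim_ definition above) =====
theorem rotate_priorities_from_history_py_spec : Claim_equal_rotate_priorities_from_history_py := by
  intro priorities recent_iterations _ hpre
  unfold Spec_rotate_priorities_from_history_py
  exact pv_main priorities recent_iterations hpre
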